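-- pv_equiv track=rewrite | github.com/benadida/helios-server | zeus/utils.py | decalize
-- ===== SOURCE A (Python) =====
-- def decalize(string, sep='-', chunk=2):
--     if not isinstance(string, str):
--         m = "argument must be an 'str', not %r" % type(string)
--         raise ValueError(m)
--     slist = []
--     s = ''
--     i = 0
--     for z, c in enumerate(string):
--         o = ord(c)
--         if o < 32 or o > 127:
--             m = ("index %d: Can only decalize printable ASCII characters "
--                  "in range 32-127, not character %d(\\x%x)")
--             m = m % (z, o, o)
--             raise ValueError(m)
--         s += "%02d" % (ord(c) - 32)
--         i += 1
--         if i == chunk: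
--             slist.append(s)
--             s = ''
--             i = 0
--
--     if s:
--         slist.append(s)
--
--     return sep.join(slist)
-- ===== SOURCE B (Python) =====
-- def decalize(string, sep='-', chunk=2):
--     # pass 1: validate and encode every char as a 2-digit decimal code
--     parts = []
--     for z, c in enumerate(string):
--         o = ord(c)
--         if o < 32 or o > 127:
--             m = ("index %d: Can only decalize printable ASCII characters "
--                  "in range 32-127, not character %d(\\x%x)")
--             raise ValueError(m % (z, o, o))
--         parts.append("%02d" % (o - 32))
--     encoded = ''.join(parts)
--     # pass 2: group the digit string into chunks and join
--     if chunk <= 0: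
--         return encoded
--     width = 2 * chunk
--     return sep.join(encoded[i:i + width] for i in range(0, len(encoded), width))
-- ===== Notes on version B (the rewrite author's own statement) =====
-- stated objective: simpler
-- what changed: B replaces A's single loop with an inline chunk counter and flush-on-count by two separated passes: one validating/encoding pass building the whole digit string, then slice-based grouping into 2*chunk-digit chunks joined by sep.
import Mathlib
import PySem

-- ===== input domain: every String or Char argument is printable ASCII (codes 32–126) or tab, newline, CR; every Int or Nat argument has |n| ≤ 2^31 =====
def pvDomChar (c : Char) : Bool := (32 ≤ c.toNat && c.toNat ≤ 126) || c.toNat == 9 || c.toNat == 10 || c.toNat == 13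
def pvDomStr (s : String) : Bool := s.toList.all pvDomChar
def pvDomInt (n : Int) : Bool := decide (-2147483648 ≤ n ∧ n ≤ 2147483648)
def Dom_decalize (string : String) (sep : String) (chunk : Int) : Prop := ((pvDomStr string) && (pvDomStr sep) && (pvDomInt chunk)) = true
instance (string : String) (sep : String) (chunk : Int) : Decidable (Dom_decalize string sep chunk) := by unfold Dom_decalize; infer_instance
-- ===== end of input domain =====

-- B separates the work into one encoding pass ('%02d' codes joined into a single digit
-- string) followed by slice-based chunking, replacing A's inline chunk counter/flush;
-- objective: simpler (same linear cost).

-- "%02d" % (ord(c) - 32): the two decimal digit characters (both Pythons use this expression)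
def pvEnc (c : Char) : List Char :=
  let n := c.toNat - 32
  [Char.ofNat (48 + n / 10), Char.ofNat (48 + n % 10)]

-- ===== PORT A =====
-- one iteration of A's loop body (the raise branch is excluded by Pre_decalize)
def pvStepA (chunk : Int) (st : List (List Char) × List Char × Int) (c : Char) :
    List (List Char) × List Char × Int :=
  let s := st.2.1 ++ pvEnc c
  let i := st.2.2 + 1
  if i = chunk then (st.1 ++ [s], ([] : List Char), (0 : Int)) else (st.1, s, i)

-- 'if s: slist.append(s)' after the loop
def pvFin (r : List (List Char) × List Char × Int) : List (List Char) :=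
  if r.2.1 = [] then r.1 else r.1 ++ [r.2.1]

def decalize (string : String) (sep : String) (chunk : Int) : String :=
  let r := string.toList.foldl (pvStepA chunk) ([], [], 0)
  String.ofList (PySem.Chars.join sep.toList (pvFin r))

-- ===== PORT B =====
def decalize_alt (string : String) (sep : String) (chunk : Int) : String :=
  let encoded : List Char := (string.toList.map pvEnc).flatten   -- ''.join(parts)
  if chunk ≤ 0 then String.ofList encoded
  else
    let width : Int := 2 * chunk
    String.ofList (PySem.Chars.join sep.toList
      ((PySem.List.pyRange 0 (encoded.length : Int) width).map
        (fun i => PySem.List.slice encoded (some i) (some (i + width)))))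

-- ===== PRECONDITION & SPEC =====
-- Pre_ excludes exactly the strings containing a character outside codes 32..127, on
-- which the Python A (and the Python B, identically) raise ValueError.
def Pre_decalize (string : String) (sep : String) (chunk : Int) : Prop :=
  string.toList.all (fun c => 32 ≤ c.toNat && c.toNat ≤ 127) = true
instance (string : String) (sep : String) (chunk : Int) : Decidable (Pre_decalize string sep chunk) := by unfold Pre_decalize; infer_instance
def pvWitness_decalize : String × String × Int := ("Hi", "-", 2)

def Spec_decalize (string : String) (sep : String) (chunk : Int) (out : String) : Prop := out = decalize_alt string sep chunk
instance (string : String) (sep : String) (chunk : Int) (out : String) : Decidable (Spec_decalize string sep chunk out) := by unfold Spec_decalize; infer_instance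

-- ===== CLAIM (what is proved, stated in full; the proofs are below) =====
def Claim_equal_decalize : Prop := ∀ (string : String) (sep : String) (chunk : Int), Dom_decalize string sep chunk → Pre_decalize string sep chunk → Spec_decalize string sep chunk (decalize string sep chunk)

-- ===== LEMMAS AND PROOFS =====

-- chunks of width (w+1) via take/drop: the canonical form both ports are reduced to
def pvChunks (w : Nat) (E : List Char) : List (List Char) :=
  match E with
  | [] => []
  | c :: rest => (c :: rest.take w) :: pvChunks w (rest.drop w)
termination_by E.length
decreasing_by simp

theorem pvChunks_nil (w : Nat) : pvChunks w [] = [] := by rw [pvChunks]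

theorem pvChunks_eq (w : Nat) (E : List Char) (hE : E ≠ []) :
    pvChunks w E = E.take (w + 1) :: pvChunks w (E.drop (w + 1)) := by
  match E with
  | c :: rest => rw [pvChunks]; simp

theorem pvEnc_ne_nil (c : Char) : pvEnc c ≠ [] := by simp [pvEnc]

-- A's loop with chunk ≤ 0: the counter never reaches chunk, everything accumulates in s
theorem pvFoldA_nonpos (chunk : Int) (hc : chunk ≤ 0) :
    ∀ (l : List Char) (slist : List (List Char)) (s : List Char) (i : Int), 0 ≤ i →
    l.foldl (pvStepA chunk) (slist, s, i) = (slist, s ++ (l.map pvEnc).flatten, i + l.length) := by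
  intro l
  induction l with
  | nil => intro slist s i hi; simp
  | cons c rest ih =>
    intro slist s i hi
    have hne : ¬ (i + 1 = chunk) := by omega
    simp only [List.foldl_cons, pvStepA, if_neg hne]
    rw [ih _ _ _ (by omega)]
    simp [List.append_assoc]
    omega

-- A's loop with chunk = (k:Int), k > 0: from state (slist, s, k - j) — j free slots in
-- the current chunk s — the finalized chunk list is slist, then s completed by the next
-- 2*j digits, then width-2k chunks of the remaining digits.
theorem pvFoldA_pos (k : Nat) (hk : 0 < k) :
    ∀ (l : List Char) (slist : List (List Char)) (s : List Char) (j : Nat),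
      0 < j → j ≤ k →
      pvFin (l.foldl (pvStepA (k : Int)) (slist, s, (k : Int) - (j : Int))) =
      slist ++ (if s = [] ∧ l = [] then []
                else (s ++ ((l.map pvEnc).flatten).take (2 * j)) ::
                     pvChunks (2 * k - 1) (((l.map pvEnc).flatten).drop (2 * j))) := by
  intro l
  induction l with
  | nil =>
    intro slist s j hj hjk
    by_cases hs : s = []
    · simp [hs, pvFin]
    · simp [hs, pvFin, pvChunks_nil]
  | cons c rest ih =>
    intro slist s j hj hjk
    obtain ⟨d1, d2, hd⟩ : ∃ d1 d2, pvEnc c = [d1, d2] := ⟨_, _, rfl⟩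
    by_cases hj1 : j = 1
    · subst hj1
      have hfire : (k : Int) - ((1 : Nat) : Int) + 1 = (k : Int) := by push_cast; ring
      simp only [List.foldl_cons, pvStepA, hfire, if_true]
      have hih := ih (slist ++ [s ++ pvEnc c]) [] k hk (le_refl k)
      rw [show ((k : Int) - (k : Int)) = (0 : Int) by ring] at hih
      rw [hih]
      have htk : ((c :: rest).map pvEnc).flatten.take (2 * 1) = pvEnc c := by
        simp [hd]
      have hdr : ((c :: rest).map pvEnc).flatten.drop (2 * 1) = (rest.map pvEnc).flatten := by
        simp [hd]
      have hne : ¬ (s = [] ∧ (c :: rest) = []) := by simp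
      rw [if_neg hne, htk, hdr, List.append_assoc, List.singleton_append]
      congr 1
      by_cases hr : rest = []
      · simp [hr, pvChunks_nil]
      · have hrE : (rest.map pvEnc).flatten ≠ [] := by
          match rest with
          | c' :: t => simp [pvEnc]
        rw [if_neg (by simp [hr]), pvChunks_eq _ _ hrE,
            show 2 * k - 1 + 1 = 2 * k by omega]
        simp
    · obtain ⟨j', rfl⟩ : ∃ j', j = j' + 1 := ⟨j - 1, by omega⟩
      have hj'pos : 0 < j' := by omega
      have hnofire : ¬ ((k : Int) - ((j' + 1 : Nat) : Int) + 1 = (k : Int)) := by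
        push_cast; omega
      simp only [List.foldl_cons, pvStepA, if_neg hnofire]
      have hst : (k : Int) - ((j' + 1 : Nat) : Int) + 1 = (k : Int) - ((j' : Nat) : Int) := by
        push_cast; ring
      rw [hst]
      rw [ih slist (s ++ pvEnc c) j' hj'pos (by omega)]
      have hne1 : ¬ (s ++ pvEnc c = [] ∧ rest = []) := by
        simp [pvEnc_ne_nil c]
      have hne2 : ¬ (s = [] ∧ (c :: rest) = []) := by simp
      rw [if_neg hne1, if_neg hne2]
      have h2j : 2 * (j' + 1) = 2 * j' + 1 + 1 := by omega
      have htk : ((c :: rest).map pvEnc).flatten.take (2 * (j' + 1)) =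
          pvEnc c ++ ((rest.map pvEnc).flatten).take (2 * j') := by
        simp [hd, h2j, List.take_succ_cons]
      have hdr : ((c :: rest).map pvEnc).flatten.drop (2 * (j' + 1)) =
          ((rest.map pvEnc).flatten).drop (2 * j') := by
        simp [hd, h2j, List.drop_succ_cons]
      rw [htk, hdr, List.append_assoc]

-- a positive-step range is nil when b ≤ a …
theorem pvRange_pos_nil (a b w : Int) (hw : 0 < w) (hab : b ≤ a) :
    PySem.List.pyRange a b w = [] := by
  rw [PySem.List.pyRange_of_pos a b hw, if_neg (by omega)]
  simp

-- … and otherwise peels its first element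
theorem pvRange_pos_cons (a b w : Int) (hw : 0 < w) (hab : a < b) :
    PySem.List.pyRange a b w = a :: PySem.List.pyRange (a + w) b w := by
  rw [PySem.List.pyRange_of_pos a b hw, PySem.List.pyRange_of_pos (a + w) b hw]
  by_cases h2 : a + w < b
  · rw [if_pos hab, if_pos h2]
    have hdiv : (b - a + w - 1) / w = (b - (a + w) + w - 1) / w + 1 := by
      rw [show b - a + w - 1 = (b - (a + w) + w - 1) + 1 * w by ring,
          Int.add_mul_ediv_right _ _ (by omega : w ≠ 0)]
    have hpos : 0 ≤ (b - (a + w) + w - 1) / w := by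
      apply Int.ediv_nonneg <;> omega
    rw [show ((b - a + w - 1) / w).toNat = ((b - (a + w) + w - 1) / w).toNat + 1 by omega,
        List.range_succ_eq_map]
    simp only [List.map_cons, List.map_map]
    congr 1
    · simp
    apply List.map_congr_left
    intro x _
    simp [Function.comp]
    ring
  · rw [if_pos hab, if_neg h2]
    have hd : (b - a + w - 1) / w = (b - a - 1) / w + 1 := by
      rw [show b - a + w - 1 = (b - a - 1) + 1 * w by ring,
          Int.add_mul_ediv_right _ _ (by omega : w ≠ 0)]
    have hz : (b - a - 1) / w = 0 := by
      apply Int.ediv_eq_zero_of_lt <;> omega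
    rw [hd, hz]
    simp

-- slice-based chunking with positive width w equals pvChunks (w.toNat - 1)
theorem pvSliceChunksAux (w : Int) (hw : 0 < w) :
    ∀ (n : Nat) (E : List Char), E.length ≤ n →
    (PySem.List.pyRange 0 (E.length : Int) w).map
      (fun i => PySem.List.slice E (some i) (some (i + w))) =
    pvChunks (w.toNat - 1) E := by
  intro n
  induction n with
  | zero =>
    intro E hE
    have : E = [] := by
      cases E with
      | nil => rfl
      | cons c t => simp at hE
    subst this
    rw [pvRange_pos_nil _ _ _ hw (by simp), pvChunks_nil]
    simp
  | succ n ih =>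
    intro E hE
    match E with
    | [] =>
      rw [pvRange_pos_nil _ _ _ hw (by simp), pvChunks_nil]
      simp
    | c :: rest =>
      have hlenpos : (0 : Int) < ((c :: rest).length : Int) := by
        simp only [List.length_cons]; positivity
      rw [pvRange_pos_cons _ _ _ hw hlenpos]
      simp only [List.map_cons, zero_add]
      have hfirst : PySem.List.slice (c :: rest) (some 0) (some w) =
          (c :: rest).take w.toNat := by
        have := PySem.List.slice_toNat (c :: rest) (le_refl (0 : Int)) hw.le
        simpa using this
      have hshift : ∀ i : Int, 0 ≤ i →
          PySem.List.slice (c :: rest) (some (w + i)) (some (w + i + w)) =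
          PySem.List.slice ((c :: rest).drop w.toNat) (some i) (some (i + w)) := by
        intro i hi
        rw [PySem.List.slice_toNat (c :: rest)
              (by omega : (0 : Int) ≤ w + i) (by omega : (0 : Int) ≤ w + i + w),
            PySem.List.slice_toNat ((c :: rest).drop w.toNat)
              hi (by omega : (0 : Int) ≤ i + w)]
        rw [List.drop_drop]
        congr 1
        · omega
        · congr 1
          omega
      have hmapshift :
          (PySem.List.pyRange w ((c :: rest).length : Int) w).map
            (fun i => PySem.List.slice (c :: rest) (some i) (some (i + w))) =
          (PySem.List.pyRange 0 ((((c :: rest).drop w.toNat).length : Int)) w).map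
            (fun i => PySem.List.slice ((c :: rest).drop w.toNat) (some i) (some (i + w))) := by
        by_cases hcase : w ≤ ((c :: rest).length : Int)
        · have hshiftrange : PySem.List.pyRange w ((c :: rest).length : Int) w =
              (PySem.List.pyRange 0 (((c :: rest).length : Int) - w) w).map (fun i => w + i) := by
            rw [PySem.List.pyRange_of_pos _ _ hw, PySem.List.pyRange_of_pos _ _ hw]
            by_cases hlt : w < ((c :: rest).length : Int)
            · rw [if_pos hlt, if_pos (by omega)]
              rw [show ((c :: rest).length : Int) - w - 0 = ((c :: rest).length : Int) - w
                    by ring]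
              simp only [List.map_map]
              apply List.map_congr_left
              intro x _
              simp [Function.comp]
            · rw [if_neg hlt, if_neg (by omega)]; simp
          rw [hshiftrange, List.map_map]
          have hdlen : ((((c :: rest).drop w.toNat).length : Int)) =
              ((c :: rest).length : Int) - w := by
            rw [List.length_drop]; push_cast; omega
          rw [hdlen]
          apply List.map_congr_left
          intro i hii
          have hi0 : 0 ≤ i := by
            obtain ⟨h1, -, -⟩ := (PySem.List.mem_pyRange_iff_of_pos hw i).mp hii
            omega
          simp only [Function.comp_apply]
          rw [hshift i hi0]
        · rw [pvRange_pos_nil _ _ _ hw (by omega),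
              pvRange_pos_nil _ _ _ hw (by rw [List.length_drop]; push_cast; omega)]
          simp
      have hwpos : 0 < w.toNat := by omega
      rw [hfirst, hmapshift,
          ih ((c :: rest).drop w.toNat) (by rw [List.length_drop]; simp at hE ⊢; omega)]
      rw [pvChunks_eq (w.toNat - 1) (c :: rest) (by simp),
          show w.toNat - 1 + 1 = w.toNat by omega]

theorem pvSliceChunks (w : Int) (hw : 0 < w) (E : List Char) :
    (PySem.List.pyRange 0 (E.length : Int) w).map
      (fun i => PySem.List.slice E (some i) (some (i + w))) =
    pvChunks (w.toNat - 1) E :=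
  pvSliceChunksAux w hw E.length E (le_refl _)

-- ===== VERDICT (by name: the statement is the Claim_ definition above) =====
theorem decalize_spec : Claim_equal_decalize := by
  unfold Claim_equal_decalize Spec_decalize
  intro string sep chunk _ _
  simp only [decalize, decalize_alt]
  by_cases hc : chunk ≤ 0
  · rw [if_pos hc]
    rw [pvFoldA_nonpos chunk hc string.toList [] [] 0 le_rfl]
    by_cases hE : (string.toList.map pvEnc).flatten = []
    · simp [hE, pvFin, PySem.Chars.join_nil]
    · simp only [pvFin, List.nil_append, if_neg hE]
      rw [PySem.Chars.join_singleton]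
  · rw [if_neg hc]
    have hck : chunk = (chunk.toNat : Int) := by omega
    rw [hck]
    have hA := pvFoldA_pos chunk.toNat (by omega) string.toList [] [] chunk.toNat
      (by omega) le_rfl
    rw [show ((chunk.toNat : Int) - ((chunk.toNat : Nat) : Int)) = (0 : Int) by ring] at hA
    rw [hA]
    rw [pvSliceChunks (2 * (chunk.toNat : Int)) (by omega)
      ((string.toList.map pvEnc).flatten)]
    simp only [List.nil_append]
    congr 1
    by_cases hE : (string.toList.map pvEnc).flatten = []
    · have hs : string.toList = [] := by
        match h : string.toList with
        | [] => rfl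
        | c :: t => rw [h] at hE; simp [pvEnc] at hE
      simp [hs, pvChunks_nil]
    · have hl : string.toList ≠ [] := by
        intro h; rw [h] at hE; simp at hE
      rw [if_neg (by simp [hl]), pvChunks_eq _ _ hE,
          show (2 * (chunk.toNat : Int)).toNat - 1 + 1 = (2 * (chunk.toNat : Int)).toNat
            by omega]
      have h2k : (2 * (chunk.toNat : Int)).toNat = 2 * chunk.toNat := by omega
      rw [h2k]
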